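-- pv_equiv track=rewrite | github.com/vicky-sol4nk1/passchecker | passchecker.py | suggest
-- ===== SOURCE A (Python) =====
-- def suggest(password):
--     suggestions = []
--
--     if not any(c.isupper() for c in password):
--         suggestions.append("Add uppercase letters")
--     if not any(c.islower() for c in password):
--         suggestions.append("Add lowercase letters")
--     if not any(c.isdigit() for c in password):
--         suggestions.append("Add numbers")
--     if not any(not c.isalnum() for c in password):
--         suggestions.append("Add special characters")
--
--     return suggestions
-- ===== SOURCE B (Python) =====
-- def suggest(password):
--     has_upper = has_lower = has_digit = has_special = False
--     for c in password:
--         if c.isupper():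
--             has_upper = True
--         if c.islower():
--             has_lower = True
--         if c.isdigit():
--             has_digit = True
--         if not c.isalnum():
--             has_special = True
--     out = []
--     if not has_upper:
--         out.append("Add uppercase letters")
--     if not has_lower:
--         out.append("Add lowercase letters")
--     if not has_digit:
--         out.append("Add numbers")
--     if not has_special:
--         out.append("Add special characters")
--     return out
-- ===== Notes on version B (the rewrite author's own statement) =====
-- stated objective: simpler
-- what changed: Replaced four separate any()-scans of the password by a single pass maintaining four boolean flags, then emitting suggestions from the flags.
import Mathlib
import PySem

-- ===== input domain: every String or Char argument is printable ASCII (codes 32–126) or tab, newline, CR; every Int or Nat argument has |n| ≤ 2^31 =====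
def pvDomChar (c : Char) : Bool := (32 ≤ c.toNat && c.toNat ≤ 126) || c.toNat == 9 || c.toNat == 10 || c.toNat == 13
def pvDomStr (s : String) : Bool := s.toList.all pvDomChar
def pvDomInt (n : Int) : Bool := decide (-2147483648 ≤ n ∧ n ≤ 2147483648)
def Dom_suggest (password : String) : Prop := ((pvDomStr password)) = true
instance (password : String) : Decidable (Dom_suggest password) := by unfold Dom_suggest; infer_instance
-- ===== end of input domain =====

-- ===== PORT A =====
-- B replaces A's four any()-scans with one flag-computing pass over the password.
def suggest (password : String) : List String :=
  let suggestions : List String := []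
  let suggestions := if !(password.toList.any PySem.Chars.isupper) then suggestions ++ ["Add uppercase letters"] else suggestions
  let suggestions := if !(password.toList.any PySem.Chars.islower) then suggestions ++ ["Add lowercase letters"] else suggestions
  let suggestions := if !(password.toList.any PySem.Chars.isdigit) then suggestions ++ ["Add numbers"] else suggestions
  let suggestions := if !(password.toList.any (fun c => !PySem.Chars.isalnum c)) then suggestions ++ ["Add special characters"] else suggestions
  suggestions

-- ===== PORT B =====
def suggest_alt (password : String) : List String :=
  let flags := password.toList.foldl
    (fun (f : Bool × Bool × Bool × Bool) c =>
      ((if PySem.Chars.isupper c then true else f.1),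
       (if PySem.Chars.islower c then true else f.2.1),
       (if PySem.Chars.isdigit c then true else f.2.2.1),
       (if !PySem.Chars.isalnum c then true else f.2.2.2)))
    (false, false, false, false)
  let out : List String := []
  let out := if !flags.1 then out ++ ["Add uppercase letters"] else out
  let out := if !flags.2.1 then out ++ ["Add lowercase letters"] else out
  let out := if !flags.2.2.1 then out ++ ["Add numbers"] else out
  let out := if !flags.2.2.2 then out ++ ["Add special characters"] else out
  out

-- ===== PRECONDITION & SPEC =====
def Spec_suggest (password : String) (out : List String) : Prop := out = suggest_alt password
instance (password : String) (out : List String) : Decidable (Spec_suggest password out) := by unfold Spec_suggest; infer_instance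

-- ===== CLAIM (what is proved, stated in full; the proofs are below) =====
def Claim_equal_suggest : Prop := ∀ (password : String), Dom_suggest password → Spec_suggest password (suggest password)

-- ===== LEMMAS AND PROOFS =====

-- ===== VERDICT (by name: the statement is the Claim_ definition above) =====
lemma flags_foldl (l : List Char) (a b c d : Bool) :
    l.foldl
      (fun (f : Bool × Bool × Bool × Bool) ch =>
        ((if PySem.Chars.isupper ch then true else f.1),
         (if PySem.Chars.islower ch then true else f.2.1),
         (if PySem.Chars.isdigit ch then true else f.2.2.1),
         (if !PySem.Chars.isalnum ch then true else f.2.2.2)))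
      (a, b, c, d)
    = (a || l.any PySem.Chars.isupper,
       b || l.any PySem.Chars.islower,
       c || l.any PySem.Chars.isdigit,
       d || l.any (fun ch => !PySem.Chars.isalnum ch)) := by
  induction l generalizing a b c d with
  | nil => simp
  | cons x xs ih =>
    simp only [List.foldl_cons, List.any_cons, ih]
    split_ifs <;> simp_all

theorem suggest_spec : Claim_equal_suggest := by
  intro password _
  unfold Spec_suggest suggest suggest_alt
  simp only [flags_foldl, Bool.false_or]
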